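-- pv_equiv track=rewrite | github.com/Ritam-chat/NPSQD | Quotient.py | getExtracedMessage
-- ===== SOURCE A (Python) =====
-- def decimalToBinary(n):
--     return bin(n).replace("0b", "")
--
-- def getExtracedMessage(DiC):
--     nArray = [1, 2, 3, 4, 5, 6, 7, 8]
--     Range = [[0, 1], [2, 5], [6, 11], [12, 19], [20, 29], [30, 41], [42, 55], [56, 63]]
--     mArray = [[[1]], [[2]], [[3], [2]], [[3]], [[4], [3]], [[4], [3]], [[4], [3]], [[4]]]
--     SubRange = [[[0, 1]], [[2, 5]], [[6, 7], [8, 11]], [[12, 19]], [[20, 21], [22, 29]], [[30, 33], [34, 41]],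
--                 [[42, 47], [48, 55]], [[56, 63]]]
--
--     index = 10
--     m = 10
--     for i in range(0,8):
--         for j in range(0,len(SubRange[i])):
--             if(DiC >= SubRange[i][j][0] and DiC <= SubRange[i][j][1]):
--                 index = i
--                 m = mArray[i][j][0]
--                 break
--
--     if(m != 10 and index!=10):
--         bin = str(decimalToBinary(DiC))
--         ExtratedStr = bin[-m:]
--
--         return ExtratedStr
--
--     return ""
-- ===== SOURCE B (Python) =====
-- def getExtracedMessage(DiC):
--     # flat lookup table: m_table[v] = number of bits to extract for value v
--     m_table = ([1] * 2 + [2] * 4 + [3] * 2 + [2] * 4 + [3] * 8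
--                + [4] * 2 + [3] * 8 + [4] * 4 + [3] * 8
--                + [4] * 6 + [3] * 8 + [4] * 8)
--     if not (0 <= DiC <= 63):
--         return ""
--     m = m_table[int(DiC)]
--     return bin(DiC).replace("0b", "")[-m:]
-- ===== Notes on version B (the rewrite author's own statement) =====
-- stated objective: simpler
-- what changed: Replaced the nested scan over Range/SubRange/mArray tables with one precomputed flat per-value bit-count table and a comparison guard, then the same bin-string slice.
import Mathlib
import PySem

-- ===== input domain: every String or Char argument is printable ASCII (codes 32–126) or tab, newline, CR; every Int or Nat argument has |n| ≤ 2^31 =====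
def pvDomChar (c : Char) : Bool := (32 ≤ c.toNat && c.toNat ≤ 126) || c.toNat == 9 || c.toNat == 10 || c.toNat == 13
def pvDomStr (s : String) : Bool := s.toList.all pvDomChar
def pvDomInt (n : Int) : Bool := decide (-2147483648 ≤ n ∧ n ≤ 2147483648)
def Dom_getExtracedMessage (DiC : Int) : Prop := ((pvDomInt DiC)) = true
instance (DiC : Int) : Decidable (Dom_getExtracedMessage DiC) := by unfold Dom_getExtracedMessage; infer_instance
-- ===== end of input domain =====

-- B replaces A's nested range-table scan by a single flat per-value bit-count table lookup (simpler).


-- ===== PORT A =====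
-- bin(n).replace("0b","") for n ≥ 0 (the only case A reaches it): binary digits, "0" for 0.
-- Ported by hand (PySem has no bin); exact for nonnegative n, and A only calls it with 0 ≤ n ≤ 63.
def pvBinDigitsAux (fuel n : Nat) : List Char :=
  match fuel with
  | 0 => []
  | fuel + 1 =>
      if n < 2 then [Char.ofNat (48 + n)]
      else pvBinDigitsAux fuel (n / 2) ++ [Char.ofNat (48 + n % 2)]

def pvBinDigits (n : Nat) : List Char := pvBinDigitsAux (n + 1) n

def decimalToBinary (n : Int) : String :=
  if n < 0 then String.ofList ('-' :: pvBinDigits n.natAbs)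
  else String.ofList (pvBinDigits n.toNat)

-- inner loop over SubRange[i] together with mArray[i]: first matching sub-range sets (index, m) and breaks
def pvInner (DiC : Int) (subs : List (Int × Int)) (ms : List Int) (i : Int)
    (st : Int × Int) : Int × Int :=
  match subs, ms with
  | (a, b) :: rest, m :: mrest =>
      if DiC ≥ a ∧ DiC ≤ b then (i, m) else pvInner DiC rest mrest i st
  | _, _ => st

def getExtracedMessage (DiC : Int) : String :=
  let SubRange : List (List (Int × Int)) :=
    [[(0,1)], [(2,5)], [(6,7),(8,11)], [(12,19)], [(20,21),(22,29)],
     [(30,33),(34,41)], [(42,47),(48,55)], [(56,63)]]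
  let mArray : List (List Int) := [[1],[2],[3,2],[3],[4,3],[4,3],[4,3],[4]]
  -- for i in range(0,8): inner loop with break; outer loop continues after a match
  let res := (List.range 8).foldl
      (fun st i => pvInner DiC (SubRange.getD i []) (mArray.getD i []) (i : Int) st)
      ((10 : Int), (10 : Int))
  if res.2 ≠ 10 ∧ res.1 ≠ 10 then
    let bin := decimalToBinary DiC
    String.ofList (PySem.List.slice bin.toList (some (-res.2)) none)  -- bin[-m:]
  else ""

-- ===== PORT B =====
def pvMTable : List Nat :=
  List.replicate 2 1 ++ List.replicate 4 2 ++ List.replicate 2 3 ++ List.replicate 4 2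
    ++ List.replicate 8 3 ++ List.replicate 2 4 ++ List.replicate 8 3 ++ List.replicate 4 4
    ++ List.replicate 8 3 ++ List.replicate 6 4 ++ List.replicate 8 3 ++ List.replicate 8 4

def getExtracedMessage_alt (DiC : Int) : String :=
  if 0 ≤ DiC ∧ DiC ≤ 63 then
    let m := pvMTable.getD DiC.toNat 0
    String.ofList (PySem.List.slice (decimalToBinary DiC).toList (some (-(m : Int))) none)
  else ""

-- ===== PRECONDITION & SPEC =====
def Spec_getExtracedMessage (DiC : Int) (out : String) : Prop := out = getExtracedMessage_alt DiC
instance (DiC : Int) (out : String) : Decidable (Spec_getExtracedMessage DiC out) := by unfold Spec_getExtracedMessage; infer_instance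

-- ===== CLAIM (what is proved, stated in full; the proofs are below) =====
def Claim_equal_getExtracedMessage : Prop := ∀ (DiC : Int), Dom_getExtracedMessage DiC → Spec_getExtracedMessage DiC (getExtracedMessage DiC)

-- ===== LEMMAS AND PROOFS =====
theorem pvInner_id (DiC : Int) (subs : List (Int × Int)) (ms : List Int) (i : Int)
    (st : Int × Int) (hD : DiC < 0 ∨ 63 < DiC)
    (h : ∀ p ∈ subs, 0 ≤ p.1 ∧ p.2 ≤ 63) : pvInner DiC subs ms i st = st := by
  induction subs generalizing ms st with
  | nil => cases ms <;> rfl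
  | cons p rest ih =>
    cases ms with
    | nil => rfl
    | cons m mrest =>
      obtain ⟨a, b⟩ := p
      have hab := h (a, b) List.mem_cons_self
      rw [pvInner, if_neg (by simp at hab ⊢; omega)]
      exact ih mrest st (fun q hq => h q (List.mem_cons_of_mem _ hq))

theorem pv_foldl_id {α β : Type} (f : α → β → α) (h : ∀ st i, f st i = st) :
    ∀ (l : List β) (init : α), List.foldl f init l = init := by
  intro l
  induction l with
  | nil => intro init; rfl
  | cons x xs ih => intro init; rw [List.foldl_cons, h]; exact ih init

theorem pv_fold_const (DiC : Int) (h : DiC < 0 ∨ 63 < DiC) :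
    List.foldl
      (fun st i => pvInner DiC
        (([[(0,1)], [(2,5)], [(6,7),(8,11)], [(12,19)], [(20,21),(22,29)],
           [(30,33),(34,41)], [(42,47),(48,55)], [(56,63)]] : List (List (Int × Int))).getD i [])
        (([[1],[2],[3,2],[3],[4,3],[4,3],[4,3],[4]] : List (List Int)).getD i [])
        (i : Int) st)
      ((10 : Int), (10 : Int)) (List.range 8) = ((10 : Int), (10 : Int)) := by
  apply pv_foldl_id
  intro st i
  apply pvInner_id DiC _ _ _ st h
  intro p hp
  match i with
  | 0 | 1 | 2 | 3 | 4 | 5 | 6 | 7 =>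
    simp [List.getD] at hp
    first
    | (obtain rfl := hp; constructor <;> norm_num)
    | (rcases hp with rfl | rfl <;> constructor <;> norm_num)
  | (n + 8) => simp [List.getD] at hp

theorem pv_out_of_range (DiC : Int) (h : DiC < 0 ∨ 63 < DiC) :
    getExtracedMessage DiC = getExtracedMessage_alt DiC := by
  unfold getExtracedMessage getExtracedMessage_alt
  simp only []
  rw [pv_fold_const DiC h, if_neg (by simp), if_neg (by omega)]

set_option maxHeartbeats 2000000 in
theorem pv_in_range (DiC : Int) (h0 : 0 ≤ DiC) (h1 : DiC ≤ 63) :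
    getExtracedMessage DiC = getExtracedMessage_alt DiC := by
  interval_cases DiC <;> decide

-- ===== VERDICT (by name: the statement is the Claim_ definition above) =====
theorem getExtracedMessage_spec : Claim_equal_getExtracedMessage := by
  intro DiC _
  unfold Spec_getExtracedMessage
  by_cases h : 0 ≤ DiC ∧ DiC ≤ 63
  · exact pv_in_range DiC h.1 h.2
  · exact pv_out_of_range DiC (by omega)
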